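-- pv_equiv track=rewrite | github.com/luiz-david05/ALG-2023.1 | beecrowd/strings/1024.py | criptografar_texto
-- ===== SOURCE A (Python) =====
-- def criptografar_texto(text):
--     for i in range(len(text)):
--             if text[i].isalpha():
--                 text = text[:i] + chr(ord(text[i]) + 3) + text[i+1:]
--
--     text = inverter_texto(text)
--     half = metade_texto(text)
--
--     for i in range(half, len(text)):
--         text = text[:i] + chr(ord(text[i]) - 1) + text[i+1:]
--
--     return text
--
-- def inverter_texto(text):
--     return text[::-1]
--
-- def metade_texto(text):
--      return len(text) // 2
-- ===== SOURCE B (Python) =====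
-- def criptografar_texto(text):
--     n = len(text)
--     half = n // 2
--     out = []
--     for i in range(n):
--         c = text[n - 1 - i]
--         code = ord(c)
--         if c.isalpha():
--             code += 3
--         if i >= half:
--             code -= 1
--         out.append(chr(code))
--     return ''.join(out)
-- ===== Notes on version B (the rewrite author's own statement) =====
-- stated objective: faster
-- what changed: Replaces A's three passes with quadratic slice-splicing string rebuilds by a single index-reflected pass that appends each output character once and joins at the end.
import Mathlib
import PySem

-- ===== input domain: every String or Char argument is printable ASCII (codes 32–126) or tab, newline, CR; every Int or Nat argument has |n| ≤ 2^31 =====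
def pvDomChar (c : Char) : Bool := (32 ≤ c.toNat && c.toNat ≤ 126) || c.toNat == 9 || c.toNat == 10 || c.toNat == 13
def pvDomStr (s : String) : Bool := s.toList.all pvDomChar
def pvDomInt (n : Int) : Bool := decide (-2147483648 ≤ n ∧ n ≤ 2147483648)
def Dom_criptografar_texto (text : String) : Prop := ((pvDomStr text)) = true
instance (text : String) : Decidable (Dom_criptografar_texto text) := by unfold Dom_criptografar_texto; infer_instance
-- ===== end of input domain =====

-- B replaces A's three passes with quadratic slice-splicing string rebuilds by a single
-- index-reflected pass that appends each output character once and joins at the end.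

-- ===== PORT A =====
def inverter_texto (text : List Char) : List Char :=
  (PySem.List.slice? text none none (-1)).getD []

def metade_texto (text : List Char) : Int :=
  PySem.Int.floordiv ((text.length : Int)) 2

def criptografar_texto (text : String) : String :=
  let t0 := text.toList
  let t1 := (PySem.List.pyRange 0 (t0.length : Int) 1).foldl
    (fun t i =>
      if PySem.Chars.isalpha (PySem.List.pyGetD t i ' ') = true then
        PySem.List.slice t none (some i)
          ++ Char.ofNat ((PySem.List.pyGetD t i ' ').toNat + 3)
          :: PySem.List.slice t (some (i + 1)) none
      else t) t0
  let t2 := inverter_texto t1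
  let half := metade_texto t2
  let t3 := (PySem.List.pyRange half (t2.length : Int) 1).foldl
    (fun t i =>
      PySem.List.slice t none (some i)
        ++ Char.ofNat ((PySem.List.pyGetD t i ' ').toNat - 1)
        :: PySem.List.slice t (some (i + 1)) none) t2
  String.ofList t3

-- ===== PORT B =====
def criptografar_texto_alt (text : String) : String :=
  let cs := text.toList
  let n := cs.length
  let half := n / 2
  let out := (List.range n).foldl (fun out i =>
    let c := cs.getD (n - 1 - i) ' '
    let code := c.toNat
    let code := if PySem.Chars.isalpha c = true then code + 3 else code
    let code := if half ≤ i then code - 1 else code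
    out ++ [Char.ofNat code]) ([] : List Char)
  String.ofList out

-- ===== PRECONDITION & SPEC =====
def Spec_criptografar_texto (text : String) (out : String) : Prop := out = criptografar_texto_alt text
instance (text : String) (out : String) : Decidable (Spec_criptografar_texto text out) := by unfold Spec_criptografar_texto; infer_instance

-- ===== CLAIM (what is proved, stated in full; the proofs are below) =====
def Claim_equal_criptografar_texto : Prop := ∀ (text : String), Dom_criptografar_texto text → Spec_criptografar_texto text (criptografar_texto text)

-- ===== LEMMAS AND PROOFS =====

-- the +3-on-alphas map (pass 1 of A) and the unconditional -1 map (pass 3 of A)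
def pvF (c : Char) : Char :=
  if PySem.Chars.isalpha c = true then Char.ofNat (c.toNat + 3) else c

def pvDec (c : Char) : Char := Char.ofNat (c.toNat - 1)

-- a splice-update loop over range(|pre|, |pre|+|suf|) rewrites each suffix position once: it is a map
theorem loop_splice (step : List Char → Int → List Char) (F : Char → Char)
    (hstep : ∀ (pre : List Char) (c : Char) (rest : List Char),
      step (pre ++ c :: rest) ((pre.length : Int)) = pre ++ F c :: rest) :
    ∀ (suf pre : List Char),
      (PySem.List.pyRange (pre.length : Int) (((pre.length + suf.length : Nat)) : Int) 1).foldl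
        step (pre ++ suf) = pre ++ suf.map F := by
  intro suf
  induction suf with
  | nil =>
    intro pre
    rw [PySem.List.pyRange_one_eq_nil (by simp)]
    simp
  | cons c rest ih =>
    intro pre
    rw [PySem.List.pyRange_one_cons (by push_cast [List.length_cons]; omega)]
    simp only [List.foldl_cons, hstep]
    have h1 : ((pre.length : Int)) + 1 = (((pre ++ [F c]).length : Nat) : Int) := by simp
    have h2 : ((pre.length + (c :: rest).length : Nat) : Int)
        = (((pre ++ [F c]).length + rest.length : Nat) : Int) := by simp; omega
    have h3 : pre ++ F c :: rest = (pre ++ [F c]) ++ rest := by simp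
    rw [h1, h2, h3, ih (pre ++ [F c])]
    simp

theorem pyGetD_append_cons (pre rest : List Char) (c : Char) :
    PySem.List.pyGetD (pre ++ c :: rest) ((pre.length : Int)) ' ' = c := by
  simp

theorem slice_to_append_cons (pre rest : List Char) (c : Char) :
    PySem.List.slice (pre ++ c :: rest) none (some ((pre.length : Int))) = pre := by
  rw [PySem.List.slice_to_natCast]; exact List.take_left ..

theorem slice_from_append_cons (pre rest : List Char) (c : Char) :
    PySem.List.slice (pre ++ c :: rest) (some ((pre.length : Int) + 1)) none = rest := by
  have h : ((pre.length : Int)) + 1 = (((pre.length + 1 : Nat)) : Int) := by push_cast; ring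
  rw [h, PySem.List.slice_from_natCast,
    show pre ++ c :: rest = (pre ++ [c]) ++ rest by simp,
    show pre.length + 1 = (pre ++ [c]).length by simp]
  exact List.drop_left ..

theorem hstep1 (pre : List Char) (c : Char) (rest : List Char) :
    (fun t (i : Int) =>
      if PySem.Chars.isalpha (PySem.List.pyGetD t i ' ') = true then
        PySem.List.slice t none (some i)
          ++ Char.ofNat ((PySem.List.pyGetD t i ' ').toNat + 3)
          :: PySem.List.slice t (some (i + 1)) none
      else t) (pre ++ c :: rest) ((pre.length : Int)) = pre ++ pvF c :: rest := by
  simp only [pyGetD_append_cons, slice_to_append_cons, slice_from_append_cons, pvF]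
  split_ifs <;> rfl

theorem hstep2 (pre : List Char) (c : Char) (rest : List Char) :
    (fun t (i : Int) =>
      PySem.List.slice t none (some i)
        ++ Char.ofNat ((PySem.List.pyGetD t i ' ').toNat - 1)
        :: PySem.List.slice t (some (i + 1)) none) (pre ++ c :: rest) ((pre.length : Int))
      = pre ++ pvDec c :: rest := by
  simp only [pyGetD_append_cons, slice_to_append_cons, slice_from_append_cons, pvDec]

theorem alpha_le (c : Char) (h : PySem.Chars.isalpha c = true) : c.toNat ≤ 122 := by
  simp only [PySem.Chars.isalpha, PySem.Chars.isupper, PySem.Chars.islower,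
    Bool.or_eq_true, Bool.and_eq_true, decide_eq_true_eq] at h
  have h2 : c ≤ 'z' ∨ c ≤ 'Z' := by tauto
  have hc : c.toNat = c.val.toNat := rfl
  rcases h2 with h2 | h2
  · have h4 := UInt32.le_iff_toNat_le.mp (Char.le_def.mp h2)
    rw [show ('z').val.toNat = 122 from rfl] at h4
    omega
  · have h4 := UInt32.le_iff_toNat_le.mp (Char.le_def.mp h2)
    rw [show ('Z').val.toNat = 90 from rfl] at h4
    omega

theorem pv_no_dec (c : Char) :
    pvF c = Char.ofNat (if PySem.Chars.isalpha c = true then c.toNat + 3 else c.toNat) := by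
  unfold pvF
  split_ifs
  · rfl
  · exact (Char.ofNat_toNat c).symm

theorem pv_dec (c : Char) :
    pvDec (pvF c)
      = Char.ofNat ((if PySem.Chars.isalpha c = true then c.toNat + 3 else c.toNat) - 1) := by
  unfold pvF pvDec
  split_ifs with h
  · rw [Char.toNat_ofNat, if_pos (Or.inl (by have := alpha_le c h; omega))]
  · rfl

-- A's three passes compute: map pvF, reverse, then map pvDec on the back half
theorem portA_eq (text : String) :
    criptografar_texto text
      = String.ofList ((text.toList.map pvF).reverse.take (text.toList.length / 2)
          ++ ((text.toList.map pvF).reverse.drop (text.toList.length / 2)).map pvDec) := by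
  simp only [criptografar_texto]
  have e1 := loop_splice (fun t (i : Int) =>
      if PySem.Chars.isalpha (PySem.List.pyGetD t i ' ') = true then
        PySem.List.slice t none (some i)
          ++ Char.ofNat ((PySem.List.pyGetD t i ' ').toNat + 3)
          :: PySem.List.slice t (some (i + 1)) none
      else t) pvF hstep1 text.toList []
  simp only [List.length_nil, Nat.cast_zero, List.nil_append, Nat.zero_add] at e1
  rw [e1]
  have einv : inverter_texto (text.toList.map pvF) = (text.toList.map pvF).reverse := by
    simp [inverter_texto, PySem.List.slice?_none_none_neg_one]
  rw [einv]
  set rs := (text.toList.map pvF).reverse with hrs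
  have hlen : rs.length = text.toList.length := by simp [hrs]
  have emet : metade_texto rs = ((text.toList.length / 2 : Nat) : Int) := by
    unfold metade_texto
    rw [hlen]
    exact_mod_cast PySem.Int.floordiv_natCast text.toList.length 2
  rw [emet]
  have e2 := loop_splice (fun t (i : Int) =>
      PySem.List.slice t none (some i)
        ++ Char.ofNat ((PySem.List.pyGetD t i ' ').toNat - 1)
        :: PySem.List.slice t (some (i + 1)) none) pvDec hstep2
    (rs.drop (text.toList.length / 2)) (rs.take (text.toList.length / 2))
  have hpl : (rs.take (text.toList.length / 2)).length = text.toList.length / 2 := by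
    simp [hlen]; omega
  rw [hpl] at e2
  have hsum : ((text.toList.length / 2 + (rs.drop (text.toList.length / 2)).length : Nat) : Int)
      = ((rs.length : Nat) : Int) := by
    simp [hlen]; omega
  rw [hsum, List.take_append_drop] at e2
  rw [e2]

-- B's append loop over range(n) computes a map over indices
theorem portB_eq (text : String) :
    criptografar_texto_alt text
      = String.ofList ((List.range text.toList.length).map (fun i =>
          Char.ofNat (if text.toList.length / 2 ≤ i then
            (if PySem.Chars.isalpha (text.toList.getD (text.toList.length - 1 - i) ' ') = true then
              (text.toList.getD (text.toList.length - 1 - i) ' ').toNat + 3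
            else (text.toList.getD (text.toList.length - 1 - i) ' ').toNat) - 1
          else
            (if PySem.Chars.isalpha (text.toList.getD (text.toList.length - 1 - i) ' ') = true then
              (text.toList.getD (text.toList.length - 1 - i) ' ').toNat + 3
            else (text.toList.getD (text.toList.length - 1 - i) ' ').toNat)))) := by
  simp only [criptografar_texto_alt]
  rw [PySem.List.foldl_append_singleton_eq_map]
  simp

theorem hrev (cs : List Char) (f : Char → Char) (j : Nat) (hj : j < cs.length) :
    (cs.map f).reverse[j]'(by simpa using hj) = f (cs[cs.length - 1 - j]'(by omega)) := by
  rw [List.getElem_reverse, List.getElem_map]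
  simp

theorem glue (cs : List Char) :
    (cs.map pvF).reverse.take (cs.length / 2)
        ++ ((cs.map pvF).reverse.drop (cs.length / 2)).map pvDec
      = (List.range cs.length).map (fun i =>
          Char.ofNat (if cs.length / 2 ≤ i then
            (if PySem.Chars.isalpha (cs.getD (cs.length - 1 - i) ' ') = true then
              (cs.getD (cs.length - 1 - i) ' ').toNat + 3
            else (cs.getD (cs.length - 1 - i) ' ').toNat) - 1
          else
            (if PySem.Chars.isalpha (cs.getD (cs.length - 1 - i) ' ') = true then
              (cs.getD (cs.length - 1 - i) ' ').toNat + 3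
            else (cs.getD (cs.length - 1 - i) ' ').toNat))) := by
  have hhalf : cs.length / 2 ≤ cs.length := Nat.div_le_self _ 2
  apply List.ext_getElem
  · simp; omega
  · intro i h1 h2
    have hi : i < cs.length := by simpa using h2
    have hgetD : cs.getD (cs.length - 1 - i) ' ' = cs[cs.length - 1 - i]'(by omega) :=
      List.getD_eq_getElem cs ' ' (by omega)
    rw [List.getElem_map, List.getElem_range, hgetD]
    by_cases hcase : i < cs.length / 2
    · rw [if_neg (by omega), ← pv_no_dec]
      rw [List.getElem_append_left (by simp; omega), List.getElem_take, hrev cs pvF i hi]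
    · rw [if_pos (by omega), ← pv_dec]
      rw [List.getElem_append_right (by simp; omega), List.getElem_map, List.getElem_drop]
      have hlt : ((cs.map pvF).reverse.take (cs.length / 2)).length = cs.length / 2 := by
        simp; omega
      simp only [hlt]
      have hidx : cs.length / 2 + (i - cs.length / 2) = i := by omega
      simp only [hidx]
      rw [hrev cs pvF i hi]

-- ===== VERDICT (by name: the statement is the Claim_ definition above) =====
theorem criptografar_texto_spec : Claim_equal_criptografar_texto := by
  intro text _
  unfold Spec_criptografar_texto
  rw [portA_eq, portB_eq, glue]
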